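-- pv_equiv track=rewrite | github.com/shindudwns/Programmers | 문자열/둘만의 암호.py | solution
-- ===== SOURCE A (Python) =====
-- def solution(s, skip, index):
--     answer = ''
--     cps=[]
--     for i in range(len(s)):
--         tmp,stack=index,0
--         while tmp:
--             if stack==26:
--                 stack=0
--             if ord(s[i])+stack>=122:
--                 temp=chr(ord(s[i])-26+stack)
--             else:
--                 temp=chr(stack+ord(s[i]))
--             if not temp in skip:
--                 tmp-=1
--             stack+=1
--         answer+=chr(ord(temp)+1)
--     return answer
-- ===== SOURCE B (Python) =====
-- def solution(s, skip, index):
--     # For each character, build its 26-candidate cycle once and pick the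
--     # index-th non-skipped candidate by modular arithmetic (A rescans the
--     # cycle index times).
--     def decode(c):
--         cands = [chr(ord(c) + k - 26) if ord(c) + k >= 122 else chr(ord(c) + k)
--                  for k in range(26)]
--         valids = [t for t in cands if t not in skip]
--         return chr(ord(valids[(index - 1) % len(valids)]) + 1)
--     return ''.join(decode(c) for c in s)
-- ===== Notes on version B (the rewrite author's own statement) =====
-- stated objective: faster
-- what changed: Instead of A's while-loop that rescans the 26-letter cycle until it has counted index non-skipped candidates (O(index) steps per character), B builds the 26-element candidate list once per character and selects the (index-1) mod V-th valid candidate directly.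
import Mathlib
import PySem

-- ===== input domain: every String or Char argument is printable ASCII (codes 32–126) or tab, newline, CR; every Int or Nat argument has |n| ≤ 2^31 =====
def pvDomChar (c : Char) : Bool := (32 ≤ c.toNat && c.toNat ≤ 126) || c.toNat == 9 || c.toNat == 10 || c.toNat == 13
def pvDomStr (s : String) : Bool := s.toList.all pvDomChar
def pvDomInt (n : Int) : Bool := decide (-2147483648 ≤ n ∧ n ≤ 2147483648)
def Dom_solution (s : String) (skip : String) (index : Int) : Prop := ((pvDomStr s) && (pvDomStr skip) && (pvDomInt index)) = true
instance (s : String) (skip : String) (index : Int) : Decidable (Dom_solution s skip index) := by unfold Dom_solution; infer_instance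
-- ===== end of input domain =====

set_option maxRecDepth 4000


-- B replaces A's per-character rescan of the 26-letter cycle (index passes) by building the
-- candidate list once and selecting modularly; objective: faster.

-- ===== PORT A =====
-- shared candidate formula: chr(ord(c)+k-26) if ord(c)+k >= 122 else chr(ord(c)+k)
-- (the wrap branch is only reached with c.toNat + k ≥ 122, so Nat subtraction is exact)
def candChar (c : Char) (k : Nat) : Char :=
  if 122 ≤ c.toNat + k then Char.ofNat (c.toNat + k - 26) else Char.ofNat (c.toNat + k)

-- A's inner while loop; fuel is a totality guard only (Python loops until tmp hits 0)
def solutionLoop (skip : String) (c : Char) : Nat → Int → Nat → Char → Char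
  | 0, _, _, temp => temp
  | fuel+1, tmp, stack, temp =>
    if tmp == 0 then temp
    else
      let stack1 := if stack == 26 then 0 else stack
      let temp1 := candChar c stack1
      -- `temp in skip`: substring test, exact char membership for a 1-char needle
      let tmp1 := if !(skip.toList.contains temp1) then tmp - 1 else tmp
      solutionLoop skip c fuel tmp1 (stack1 + 1) temp1

def solution (s : String) (skip : String) (index : Int) : String :=
  s.toList.foldl (fun answer ch =>
    let temp := solutionLoop skip ch (26 * index.toNat + 26) index 0 ' '
    answer.push (Char.ofNat (temp.toNat + 1))) ""

-- ===== PORT B =====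
def decodeChar (skip : String) (index : Int) (c : Char) : Char :=
  let cands := (List.range 26).map (fun k => candChar c k)
  let valids := cands.filter (fun t => !(skip.toList.contains t))
  let src := valids.getD (PySem.Int.mod (index - 1) (valids.length : Int)).toNat ' '
  Char.ofNat (src.toNat + 1)

def solution_alt (s : String) (skip : String) (index : Int) : String :=
  String.ofList (s.toList.map (decodeChar skip index))

-- ===== PRECONDITION & SPEC =====
-- A returns normally iff s is empty, or index ≥ 1 and every character of s has some
-- non-skipped candidate in its 26-letter cycle (otherwise A raises NameError at index 0,
-- or loops forever for index < 0 or an all-skipped character).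
-- c has some non-skipped candidate in its cycle
def hasValid (skip : String) (c : Char) : Bool :=
  !(((List.range 26).map (fun k => candChar c k)).filter (fun t => !(skip.toList.contains t))).isEmpty
def Pre_solution (s : String) (skip : String) (index : Int) : Prop :=
  s.toList = [] ∨ (1 ≤ index ∧ s.toList.all (hasValid skip) = true)
instance (s : String) (skip : String) (index : Int) : Decidable (Pre_solution s skip index) := by
  unfold Pre_solution; infer_instance
def pvWitness_solution : String × String × Int := ("aw", "z", 5)

def Spec_solution (s : String) (skip : String) (index : Int) (out : String) : Prop := out = solution_alt s skip index
instance (s : String) (skip : String) (index : Int) (out : String) : Decidable (Spec_solution s skip index out) := by unfold Spec_solution; infer_instance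

-- ===== CLAIM (what is proved, stated in full; the proofs are below) =====
def Claim_equal_solution : Prop := ∀ (s : String) (skip : String) (index : Int), Dom_solution s skip index → Pre_solution s skip index → Spec_solution s skip index (solution s skip index)

-- ===== LEMMAS AND PROOFS =====

-- positions the loop visits, starting at position p of the 26-cycle
def posList (p : Nat) : List Nat := (List.range 26).drop p ++ (List.range 26).take p

-- the valid (non-skipped) candidates from position p onward (one full cycle)
def valsFrom (skip : String) (c : Char) (p : Nat) : List Char :=
  ((posList p).map (candChar c)).filter (fun t => !(skip.toList.contains t))

-- number of positions scanned (from p) before the first valid candidate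
def nv (skip : String) (c : Char) (p : Nat) : Nat :=
  ((posList p).map (candChar c)).findIdx (fun t => !(skip.toList.contains t))

lemma posList_step : ∀ p, p < 26 → posList p = p :: (posList p).tail ∧
    posList (p+1) = (posList p).tail ++ [p] := by decide

lemma posList26 : posList 26 = posList 0 := by decide

lemma posList_length : ∀ p, p ≤ 26 → (posList p).length = 26 := by decide

lemma findIdx_append_left {l₁ l₂ : List Char} {p : Char → Bool} (h : l₁.any p) :
    (l₁ ++ l₂).findIdx p = l₁.findIdx p := by
  rw [List.findIdx_append,
    if_pos (List.findIdx_lt_length.mpr (by simpa [List.any_eq_true] using h))]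

lemma valsFrom_step (skip : String) (c : Char) (p : Nat) (hp : p < 26) :
    valsFrom skip c p =
      (if !(skip.toList.contains (candChar c p)) then [candChar c p] else []) ++
        (((posList p).tail.map (candChar c)).filter (fun t => !(skip.toList.contains t))) ∧
    valsFrom skip c (p+1) =
      (((posList p).tail.map (candChar c)).filter (fun t => !(skip.toList.contains t))) ++
        (if !(skip.toList.contains (candChar c p)) then [candChar c p] else []) := by
  obtain ⟨h1, h2⟩ := posList_step p hp
  constructor
  · conv_lhs => rw [valsFrom, h1]
    by_cases h : candChar c p ∈ skip.toList <;> simp [h]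
  · rw [valsFrom, h2]
    by_cases h : candChar c p ∈ skip.toList <;> simp [List.filter_append, h]

lemma valsFrom_length (skip : String) (c : Char) : ∀ p, p ≤ 26 →
    (valsFrom skip c p).length = (valsFrom skip c 0).length := by
  intro p
  induction p with
  | zero => intro _; rfl
  | succ n ih =>
    intro h
    obtain ⟨h1, h2⟩ := valsFrom_step skip c n (by omega)
    have hl : (valsFrom skip c (n+1)).length = (valsFrom skip c n).length := by
      rw [h1, h2]; simp [List.length_append]; omega
    rw [hl]; exact ih (by omega)

lemma posList0 : posList 0 = List.range 26 := by decide

lemma valsFrom26 (skip : String) (c : Char) : valsFrom skip c 26 = valsFrom skip c 0 := by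
  unfold valsFrom; rw [posList26]

lemma nv26 (skip : String) (c : Char) : nv skip c 26 = nv skip c 0 := by
  unfold nv; rw [posList26]

lemma loop_zero (skip : String) (c : Char) : ∀ (f : Nat) (st : Nat) (temp : Char),
    solutionLoop skip c f 0 st temp = temp := by
  intro f st temp
  cases f <;> simp [solutionLoop]

lemma valsFrom_ne (skip : String) (c : Char) (hV : valsFrom skip c 0 ≠ []) (p : Nat)
    (hp : p ≤ 26) : valsFrom skip c p ≠ [] := by
  intro h
  apply hV
  have := valsFrom_length skip c p hp
  rw [h] at this
  exact List.eq_nil_of_length_eq_zero this.symm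

lemma nv_le (skip : String) (c : Char) (hV : valsFrom skip c 0 ≠ []) (p : Nat)
    (hp : p ≤ 26) : nv skip c p ≤ 25 := by
  have hne := valsFrom_ne skip c hV p hp
  have hex : ∃ x ∈ (posList p).map (candChar c), (!(skip.toList.contains x)) = true := by
    by_contra hno
    push Not at hno
    exact hne (List.filter_eq_nil_iff.mpr (by intro a ha; simpa using hno a ha))
  have hlt := List.findIdx_lt_length.mpr hex
  have hlen : ((posList p).map (candChar c)).length = 26 := by
    rw [List.length_map]; exact posList_length p hp
  unfold nv
  omega

lemma nv_step (skip : String) (c : Char) (p : Nat) (hp : p < 26)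
    (hok : skip.toList.contains (candChar c p) = true)
    (hne : valsFrom skip c p ≠ []) : nv skip c p = nv skip c (p+1) + 1 := by
  obtain ⟨h1, h2⟩ := posList_step p hp
  have htail : ((posList p).tail.map (candChar c)).any (fun t => !(skip.toList.contains t)) = true := by
    have hmem : candChar c p ∈ skip.toList := by simpa using hok
    have hvp : valsFrom skip c p =
        ((posList p).tail.map (candChar c)).filter (fun t => !(skip.toList.contains t)) := by
      have := (valsFrom_step skip c p hp).1
      simpa [hmem] using this
    rw [hvp] at hne
    rcases List.exists_mem_of_ne_nil _ hne with ⟨x, hx⟩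
    rw [List.mem_filter] at hx
    exact List.any_eq_true.mpr ⟨x, hx.1, hx.2⟩
  have hnvp : nv skip c p =
      ((posList p).tail.map (candChar c)).findIdx (fun t => !(skip.toList.contains t)) + 1 := by
    have hmem : candChar c p ∈ skip.toList := by simpa using hok
    unfold nv
    conv_lhs => rw [h1]
    simp [List.findIdx_cons, hmem]
  have hnvp1 : nv skip c (p+1) =
      ((posList p).tail.map (candChar c)).findIdx (fun t => !(skip.toList.contains t)) := by
    unfold nv
    rw [h2, List.map_append]
    exact findIdx_append_left htail
  omega

-- rotation: indexing a one-step rotation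
lemma rot_getD (a : Char) (X : List Char) (d : Char) (j : Nat) :
    (a :: X).getD ((j+1) % (X.length+1)) d = (X ++ [a]).getD (j % (X.length+1)) d := by
  have hmod : (j+1) % (X.length+1) = (j % (X.length+1) + 1) % (X.length+1) := by
    rw [Nat.mod_add_mod]
  have hi : j % (X.length+1) < X.length+1 := Nat.mod_lt _ (by omega)
  by_cases hc : j % (X.length+1) = X.length
  · rw [hmod, hc]
    have h0 : (X.length + 1) % (X.length + 1) = 0 := Nat.mod_self _
    rw [h0, List.getD_cons_zero, List.getD_eq_getElem?_getD,
      List.getElem?_append_right (le_refl X.length)]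
    simp
  · have h1 : j % (X.length+1) < X.length := by omega
    have h2 : (j % (X.length+1) + 1) % (X.length+1) = j % (X.length+1) + 1 :=
      Nat.mod_eq_of_lt (by omega)
    rw [hmod, h2, List.getD_cons_succ, List.getD_eq_getElem?_getD, List.getD_eq_getElem?_getD,
      List.getElem?_append_left h1]

-- one unfolding of A's while loop when tmp ≠ 0
lemma loop_succ (skip : String) (c : Char) (fuel : Nat) (tmp : Int) (stack : Nat) (temp : Char)
    (h : tmp ≠ 0) :
    solutionLoop skip c (fuel+1) tmp stack temp =
      solutionLoop skip c fuel
        (if !(skip.toList.contains (candChar c (if stack = 26 then 0 else stack))) then tmp - 1 else tmp)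
        ((if stack = 26 then 0 else stack) + 1)
        (candChar c (if stack = 26 then 0 else stack)) := by
  simp only [solutionLoop, beq_iff_eq]
  rw [if_neg h]

-- ML: the loop from state (t, st) returns the ((t-1) mod V)-th valid candidate from position st
lemma loop_eq (skip : String) (c : Char) (hV : valsFrom skip c 0 ≠ []) :
    ∀ fuel (t : Nat) (st : Nat) (temp : Char), st ≤ 26 → 1 ≤ t →
      26*(t-1) + nv skip c (if st = 26 then 0 else st) + 1 ≤ fuel →
      solutionLoop skip c fuel (t : Int) st temp
        = (valsFrom skip c (if st = 26 then 0 else st)).getD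
            ((t-1) % (valsFrom skip c 0).length) ' ' := by
  intro fuel
  induction fuel with
  | zero => intro t st temp hst ht hfuel; omega
  | succ fuel ih =>
    intro t st temp hst ht hfuel
    rw [loop_succ skip c fuel (t:Int) st temp (by exact_mod_cast by omega)]
    set p := (if st = 26 then 0 else st) with hpdef
    have hplt : p < 26 := by rw [hpdef]; split <;> omega
    have hq : valsFrom skip c (if p+1 = 26 then 0 else p+1) = valsFrom skip c (p+1) := by
      split
      · next h26 => rw [h26]; exact (valsFrom26 skip c).symm
      · rfl
    have hnvq : nv skip c (if p+1 = 26 then 0 else p+1) = nv skip c (p+1) := by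
      split
      · next h26 => rw [h26]; exact (nv26 skip c).symm
      · rfl
    have hVlen : 1 ≤ (valsFrom skip c 0).length := by
      rcases h : valsFrom skip c 0 with _ | ⟨x, xs⟩
      · exact absurd h hV
      · simp
    by_cases hok : skip.toList.contains (candChar c p) = true
    · -- skipped candidate: tmp unchanged, position advances
      have hmem : candChar c p ∈ skip.toList := by simpa using hok
      rw [if_neg (by simp [hmem])]
      have hbound : 26*(t-1) + nv skip c (if p+1 = 26 then 0 else p+1) + 1 ≤ fuel := by
        have hstep := nv_step skip c p hplt hok (valsFrom_ne skip c hV p (by omega))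
        rw [hnvq]; omega
      rw [ih t (p+1) (candChar c p) (by omega) ht hbound]
      rw [hq]
      -- both sides are the same filtered tail
      obtain ⟨hs1, hs2⟩ := valsFrom_step skip c p hplt
      rw [hs1, hs2]
      simp [hmem]
    · -- valid candidate: tmp decreases
      have hnmem : candChar c p ∉ skip.toList := by simpa using hok
      rw [if_pos (by simp [hnmem])]
      obtain ⟨hs1, hs2⟩ := valsFrom_step skip c p hplt
      have hlenp : (valsFrom skip c p).length = (valsFrom skip c 0).length :=
        valsFrom_length skip c p (by omega)
      by_cases ht1 : t = 1
      · subst ht1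
        norm_num
        rw [loop_zero]
        rw [hs1]
        simp [hnmem]
      · have hcast : (t:Int) - 1 = ((t-1 : Nat) : Int) := by omega
        rw [hcast]
        have hbound : 26*(t-1-1) + nv skip c (if p+1 = 26 then 0 else p+1) + 1 ≤ fuel := by
          have hnq : nv skip c (if p+1 = 26 then 0 else p+1) ≤ 25 := by
            rw [hnvq]; exact nv_le skip c hV (p+1) (by omega)
          omega
        rw [ih (t-1) (p+1) (candChar c p) (by omega) (by omega) hbound]
        rw [hq, hs2, hs1]
        have hif : (if (!(skip.toList.contains (candChar c p))) = true
            then [candChar c p] else []) = [candChar c p] := by simp [hnmem]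
        rw [hif]
        have hVE : (valsFrom skip c 0).length =
            (((posList p).tail.map (candChar c)).filter
              (fun t => !(skip.toList.contains t))).length + 1 := by
          rw [← hlenp, hs1, hif]; simp
        have h11 : t - 1 - 1 = t - 2 := by omega
        have h21 : t - 2 + 1 = t - 1 := by omega
        rw [hVE, h11, ← h21]
        exact (rot_getD (candChar c p)
          (((posList p).tail.map (candChar c)).filter (fun t => !(skip.toList.contains t)))
          ' ' (t-2)).symm


-- per-character equality under the precondition
lemma char_eq (skip : String) (c : Char) (index : Int) (hi : 1 ≤ index)
    (hV : hasValid skip c = true) :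
    Char.ofNat ((solutionLoop skip c (26 * index.toNat + 26) index 0 ' ').toNat + 1)
      = decodeChar skip index c := by
  have hvals : ((List.range 26).map (fun k => candChar c k)).filter
      (fun t => !(skip.toList.contains t)) = valsFrom skip c 0 := by
    unfold valsFrom; rw [posList0]
  have hVne : valsFrom skip c 0 ≠ [] := by
    intro h
    rw [← hvals] at h
    unfold hasValid at hV
    rw [h] at hV
    simp at hV
  have hidx : index = ((index.toNat : Nat) : Int) := by omega
  have hnv0 := nv_le skip c hVne 0 (by omega)
  have hloop := loop_eq skip c hVne (26 * index.toNat + 26) index.toNat 0 ' '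
      (by omega) (by omega) (by simp only [ite_self]; omega)
  simp only [ite_self] at hloop
  rw [← hidx] at hloop
  rw [hloop]
  have hm : PySem.Int.mod (index - 1) ((valsFrom skip c 0).length : Int)
      = (((index.toNat - 1) % (valsFrom skip c 0).length : Nat) : Int) := by
    rw [show index - 1 = ((index.toNat - 1 : Nat) : Int) by omega]
    exact PySem.Int.mod_natCast _ _
  simp only [decodeChar, hvals, hm, Int.toNat_natCast]

-- the foldl of A's outer loop, on the character level
lemma fold_toList (skip : String) (index : Int) (l : List Char)
    (hl : ∀ c ∈ l, Char.ofNat ((solutionLoop skip c (26 * index.toNat + 26) index 0 ' ').toNat + 1)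
            = decodeChar skip index c) :
    ∀ acc : String,
      (l.foldl (fun answer ch =>
          let temp := solutionLoop skip ch (26 * index.toNat + 26) index 0 ' '
          answer.push (Char.ofNat (temp.toNat + 1))) acc).toList
        = acc.toList ++ l.map (decodeChar skip index) := by
  induction l with
  | nil => intro acc; simp
  | cons x xs ih =>
    intro acc
    rw [List.foldl_cons, ih (fun c hc => hl c (List.mem_cons_of_mem _ hc))]
    simp [hl x (by simp)]

theorem solution_spec : Claim_equal_solution := by
  intro s skip index hdom hpre
  unfold Spec_solution
  apply String.toList_injective
  rcases hpre with hnil | ⟨hidx, hall⟩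
  · unfold solution solution_alt
    rw [hnil]
    simp
  · unfold solution solution_alt
    rw [fold_toList skip index s.toList (fun c hc =>
      char_eq skip c index hidx (List.all_eq_true.mp hall c hc)) ""]
    simp
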